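-- pv_equiv track=rewrite | github.com/benrich37/perlStuff | helpers/neb_helpers.py | get_good_idcs_walker
-- ===== SOURCE A (Python) =====
-- def get_good_idcs_walker(part):
--     last = None
--     good = []
--     for i, en in enumerate(part):
--         if last is None:
--             last = en
--             good.append(i)
--         else:
--             if en > last:
--                 if part[-1] <= last:
--                     good.append(len(part) - 1)
--                 return good
--             else:
--                 good.append(i)
--                 last = en
--     return good
-- ===== SOURCE B (Python) =====
-- def get_good_idcs_walker(part):
--     # Stage 1: vector of pairwise 'non-increasing' flags; Stage 2: locate the
--     # first False with list.index (sentinel False guarantees a hit), giving the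
--     # length of the maximal non-increasing prefix run; Stage 3: materialise.
--     n = len(part)
--     if n == 0:
--         return []
--     ok = [b <= a for a, b in zip(part, part[1:])]
--     run = (ok + [False]).index(False) + 1
--     good = list(range(run))
--     if run < n and part[-1] <= part[run - 1]:
--         good.append(n - 1)
--     return good
-- ===== Notes on version B (the rewrite author's own statement) =====
-- stated objective: alternative
-- what changed: A's single stateful walk (carrying 'last', appending indices and returning early inside the loop) is replaced by three loop-free stages: build the vector of pairwise non-increase flags with zip, locate the first failed comparison with list.index on the sentinel-terminated vector to get the run length, then materialise list(range(run)) plus the conditional tail index.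
import Mathlib
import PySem

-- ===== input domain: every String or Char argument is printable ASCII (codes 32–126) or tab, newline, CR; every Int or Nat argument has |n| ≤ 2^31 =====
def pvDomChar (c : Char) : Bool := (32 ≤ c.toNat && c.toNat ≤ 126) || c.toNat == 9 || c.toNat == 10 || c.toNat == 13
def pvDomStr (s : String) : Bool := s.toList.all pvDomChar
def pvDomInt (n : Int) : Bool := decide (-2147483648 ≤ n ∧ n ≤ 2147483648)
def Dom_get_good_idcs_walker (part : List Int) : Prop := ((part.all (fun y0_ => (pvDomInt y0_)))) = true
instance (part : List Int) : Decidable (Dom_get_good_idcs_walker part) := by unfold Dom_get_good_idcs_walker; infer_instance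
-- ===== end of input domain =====

-- B replaces A's stateful early-return walk by three stages: a comparison vector over adjacent
-- pairs, a list.index search for the first failed comparison (sentinel-terminated), and a
-- materialisation of the run's indices (objective: alternative decomposition, same O(n) cost).

-- ===== PORT A =====
-- the for-loop of A: state = (remaining elements, index i, last, good); early return on the first increase
def pvLoopA (part : List Int) : List Int → Int → Option Int → List Int → List Int
  | [], _, _, good => good
  | en :: rest, i, last, good =>
    match last with
    | none => pvLoopA part rest (i + 1) (some en) (good ++ [i])
    | some l =>
      if en > l then
        match PySem.List.pyGet? part (-1) with
        | some lastEl => if lastEl ≤ l then good ++ [(part.length : Int) - 1] else good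
        | none => good   -- part[-1] on the empty list: unreachable (the loop body runs only when part ≠ [])
      else pvLoopA part rest (i + 1) (some en) (good ++ [i])

def get_good_idcs_walker (part : List Int) : List Int :=
  pvLoopA part part 0 none []

-- ===== PORT B =====
def get_good_idcs_walker_alt (part : List Int) : List Int :=
  let n := part.length
  if n = 0 then []
  else
    -- ok = [b <= a for a, b in zip(part, part[1:])]
    let ok := (part.zip (part.drop 1)).map (fun p => decide (p.2 ≤ p.1))
    -- run = (ok + [False]).index(False) + 1  — the sentinel False is always found, so index? is never none
    let run := (PySem.List.index? (ok ++ [false]) false).getD 0 + 1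
    let good := (List.range run).map Int.ofNat
    if run < n then
      match PySem.List.pyGet? part (-1), PySem.List.pyGet? part ((run : Int) - 1) with
      | some lastEl, some pv => if lastEl ≤ pv then good ++ [(n : Int) - 1] else good
      | _, _ => good   -- unreachable: 1 ≤ run < n, part ≠ []
    else good

-- ===== PRECONDITION & SPEC =====
def Spec_get_good_idcs_walker (part : List Int) (out : List Int) : Prop := out = get_good_idcs_walker_alt part
instance (part : List Int) (out : List Int) : Decidable (Spec_get_good_idcs_walker part out) := by unfold Spec_get_good_idcs_walker; infer_instance

-- ===== CLAIM (what is proved, stated in full; the proofs are below) =====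
def Claim_equal_get_good_idcs_walker : Prop := ∀ (part : List Int), Dom_get_good_idcs_walker part → Spec_get_good_idcs_walker part (get_good_idcs_walker part)

-- ===== LEMMAS AND PROOFS =====

-- proof-side characterisation of both programs: the counter position of the first increasing pair
def pvFindBrk : List (Int × Int) → Nat → Option Nat
  | [], _ => none
  | (a, b) :: rest, k => if b > a then some k else pvFindBrk rest (k + 1)

lemma pvFindBrk_le (l : List (Int × Int)) : ∀ (m i : Nat), pvFindBrk l m = some i → m ≤ i := by
  induction l with
  | nil => intro m i h; simp [pvFindBrk] at h
  | cons p rest ih =>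
    intro m i h
    obtain ⟨a, b⟩ := p
    simp only [pvFindBrk] at h
    split at h
    · simp_all
    · have := ih (m + 1) i h; omega

lemma pvFindBrk_lt (l : List (Int × Int)) : ∀ (m i : Nat), pvFindBrk l m = some i → i < m + l.length := by
  induction l with
  | nil => intro m i h; simp [pvFindBrk] at h
  | cons p rest ih =>
    intro m i h
    obtain ⟨a, b⟩ := p
    simp only [pvFindBrk] at h
    split at h
    · simp_all
    · have := ih (m + 1) i h; simp only [List.length_cons]; omega

-- B's staged search agrees with the counter-based break finder
lemma pvBridge (l : List (Int × Int)) : ∀ (k : Nat),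
    PySem.List.index? (l.map (fun p => decide (p.2 ≤ p.1)) ++ [false]) false =
      some (match pvFindBrk l (k + 1) with
            | none => l.length
            | some i => i - (k + 1)) := by
  induction l with
  | nil =>
    intro k
    simp [pvFindBrk, PySem.List.index?_eq_idxOf?, List.idxOf?_cons]
  | cons p rest ih =>
    intro k
    obtain ⟨a, b⟩ := p
    by_cases hgt : b > a
    · have hf : decide (b ≤ a) = false := by simp; omega
      simp [pvFindBrk, hgt, hf, PySem.List.index?_eq_idxOf?, List.idxOf?_cons]
    · have ht : decide (b ≤ a) = true := by simp; omega
      have ihk := ih (k + 1)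
      simp only [PySem.List.index?_eq_idxOf?] at ihk ⊢
      simp only [List.map_cons, List.cons_append, ht, List.idxOf?_cons]
      rw [ihk]
      simp only [pvFindBrk, if_neg hgt]
      cases hF : pvFindBrk rest (k + 1 + 1) with
      | none => simp
      | some i =>
        have := pvFindBrk_le rest (k + 2) i (by simpa using hF)
        have h2 : i - (k + 1 + 1) + 1 = i - (k + 1) := by omega
        simp [h2]

lemma pvMain (part : List Int) : ∀ (ps : List Int) (k : Nat) (prev : Int) (good : List Int),
    part.drop k = ps → 1 ≤ k →
    PySem.List.pyGet? part ((k : Int) - 1) = some prev →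
    pvLoopA part ps (k : Int) (some prev) good =
      match pvFindBrk ((prev :: ps).zip ps) k with
      | none => good ++ (List.range' k ps.length).map Int.ofNat
      | some i => (good ++ (List.range' k (i - k)).map Int.ofNat) ++
          (match PySem.List.pyGet? part (-1), PySem.List.pyGet? part ((i : Int) - 1) with
           | some lastEl, some pv => if lastEl ≤ pv then [(part.length : Int) - 1] else []
           | _, _ => []) := by
  intro ps
  induction ps with
  | nil => intro k prev good _ _ _; simp [pvLoopA, pvFindBrk]
  | cons x rest ih =>
    intro k prev good hdrop hk hprev
    have hdrop' : part.drop (k + 1) = rest := by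
      have : part.drop (k + 1) = (part.drop k).drop 1 := by
        rw [List.drop_drop]
      rw [this, hdrop]
      simp
    have hx : PySem.List.pyGet? part ((k : Int)) = some x := by
      have h1 : part[k]? = some x := by
        rw [← List.head?_drop, hdrop]
        rfl
      simpa [PySem.List.pyGet?_natCast] using h1
    simp only [pvLoopA, List.zip_cons_cons, pvFindBrk]
    by_cases hgt : x > prev
    · simp only [if_pos hgt]
      cases hL : PySem.List.pyGet? part (-1) with
      | none => simp
      | some lastEl =>
        simp only [hprev]
        split_ifs <;> simp
    · simp only [if_neg hgt]
      have hx' : PySem.List.pyGet? part (((k + 1 : Nat) : Int) - 1) = some x := by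
        push_cast
        simpa using hx
      have := ih (k + 1) x (good ++ [(k : Int)]) hdrop' (by omega) hx'
      push_cast at this
      rw [this]
      cases hF : pvFindBrk ((x :: rest).zip rest) (k + 1) with
      | none =>
        simp only [List.length_cons]
        rw [List.range'_succ]
        simp
      | some i =>
        have hki : k + 1 ≤ i := pvFindBrk_le _ _ _ hF
        simp only
        have hrk : List.range' k (i - k) = k :: List.range' (k + 1) (i - (k + 1)) := by
          have h1 : i - k = (i - (k + 1)) + 1 := by omega
          rw [h1, List.range'_succ]
        rw [hrk]
        simp

theorem pv_top (part : List Int) : get_good_idcs_walker part = get_good_idcs_walker_alt part := by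
  cases part with
  | nil => rfl
  | cons p0 ps0 =>
    have hprev : PySem.List.pyGet? (p0 :: ps0) (((1 : Nat) : Int) - 1) = some p0 := by
      norm_num
    have hstart : get_good_idcs_walker (p0 :: ps0)
        = pvLoopA (p0 :: ps0) ps0 ((1 : Nat) : Int) (some p0) [0] := by
      simp [get_good_idcs_walker, pvLoopA]
    rw [hstart, pvMain (p0 :: ps0) ps0 1 p0 [0] (by simp) (by omega) hprev]
    have hzip : (p0 :: ps0).zip ((p0 :: ps0).drop 1) = (p0 :: ps0).zip ps0 := by simp
    simp only [get_good_idcs_walker_alt, hzip]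
    rw [pvBridge ((p0 :: ps0).zip ps0) 0]
    have hlen : ((p0 :: ps0).zip ps0).length = ps0.length := by simp
    cases hF : pvFindBrk ((p0 :: ps0).zip ps0) (0 + 1) with
    | none =>
      simp only [Option.getD_some]
      have hr : List.range (ps0.length + 1) = 0 :: List.range' 1 ps0.length := by
        rw [List.range_eq_range']
        simp [List.range'_succ]
      simp [hr]
    | some i =>
      have h1i : 1 ≤ i := pvFindBrk_le _ _ _ hF
      have hin : i < 1 + ps0.length := by
        have := pvFindBrk_lt _ _ _ hF
        omega
      simp only [Option.getD_some]
      have hrun : i - (0 + 1) + 1 = i := by omega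
      have hlt : i - (0 + 1) + 1 < (p0 :: ps0).length := by
        simp only [List.length_cons]; omega
      rw [hrun]
      simp only [List.length_cons, if_neg (by simp : ¬ ps0.length + 1 = 0),
        if_pos (show i < ps0.length + 1 by omega)]
      have hr : List.range i = 0 :: List.range' 1 (i - 1) := by
        rw [List.range_eq_range']
        have : i = (i - 1) + 1 := by omega
        rw [this, List.range'_succ]
        simp
      rw [hr]
      cases hL : PySem.List.pyGet? (p0 :: ps0) (-1) with
      | none => simp
      | some lastEl =>
        cases hP : PySem.List.pyGet? (p0 :: ps0) ((i : Int) - 1) with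
        | none => simp
        | some pv =>
          simp only
          split_ifs <;> simp

-- ===== VERDICT (by name: the statement is the Claim_ definition above) =====
theorem get_good_idcs_walker_spec : Claim_equal_get_good_idcs_walker := by
  intro part _
  unfold Spec_get_good_idcs_walker
  exact pv_top part
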